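-- pv_equiv track=rewrite | github.com/hearues-zueke-github/python_programs | sequence_generators/custom_sequences.py | f_with_recursion_mult_1
-- ===== SOURCE A (Python) =====
-- def f_with_recursion_mult_1(n):
--     lst = [0, 1]
--     modulo = 10
--     def f1(n_start):
--         def f2(n, s, acc):
--             new_s = s
--             if n >= 1:
--                 new_s = f2(
--                             n-acc-lst[n]-1,
--                             (s+lst[n])%modulo,
--                             acc+lst[n]+1,
--                         )
--             return new_s
--         return f2(n_start-1, 0, 0)
--
--     len_lst = len(lst)
--     for i in range(len_lst, len_lst+n-1):
--         lst.append(f1(i))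
--
--     return lst[1:]
-- ===== SOURCE B (Python) =====
-- def f_with_recursion_mult_1(n):
--     def step(seq):
--         # one growth step: run the jump walk from the top of seq, summing the
--         # visited values, and append the sum reduced mod 10
--         j, acc, total = len(seq) - 1, 0, 0
--         while j >= 1:
--             v = seq[j]
--             total += v
--             j -= acc + v + 1
--             acc += v + 1
--         seq.append(total % 10)
--         return seq
--
--     seq = [0, 1]
--     while len(seq) <= n:
--         seq = step(seq)
--     return seq[1:]
-- ===== Notes on version B (the rewrite author's own statement) =====
-- stated objective: alternative
-- what changed: Replaces A's nested recursive helpers f1/f2 (threading a mod-10 accumulator through recursion, driven by an index for-loop) with a grow-until-length while-loop whose step function runs the jump walk as a plain iterative loop, summing visited values and taking a single modulo at the end.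
import Mathlib
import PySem

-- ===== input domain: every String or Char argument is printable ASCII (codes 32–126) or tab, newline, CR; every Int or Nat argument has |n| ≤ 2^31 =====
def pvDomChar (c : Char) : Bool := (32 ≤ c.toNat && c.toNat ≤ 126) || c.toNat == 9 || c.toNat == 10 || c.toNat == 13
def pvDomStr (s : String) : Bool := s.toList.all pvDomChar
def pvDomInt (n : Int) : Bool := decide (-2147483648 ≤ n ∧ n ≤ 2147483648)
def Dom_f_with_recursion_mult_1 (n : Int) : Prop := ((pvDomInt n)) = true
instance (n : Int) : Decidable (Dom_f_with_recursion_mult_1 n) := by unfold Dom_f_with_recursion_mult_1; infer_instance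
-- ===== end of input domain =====

-- B replaces A's nested recursive helpers (index for-loop + mod-threading recursion) by a
-- grow-until-length while-loop whose step runs the jump walk iteratively, summing the
-- visited values plainly and taking one modulo at the end (objective: alternative).

-- ===== PORT A =====
-- A's inner recursive helper f2; the Nat argument is fuel, a totalization guard only:
-- in every state the Python reaches it never runs out (n decreases by at least 1 per call).
def pvF2 (lst : List Int) : Nat → Int → Int → Int → Int
  | 0, _, s, _ => s
  | fuel+1, n, s, acc =>
      if n ≥ 1 then
        let v := (PySem.List.pyGet? lst n).getD 0
        pvF2 lst fuel (n - acc - v - 1) (PySem.Int.mod (s + v) 10) (acc + v + 1)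
      else s

def pvF1 (lst : List Int) (nStart : Int) : Int :=
  pvF2 lst (nStart - 1).toNat (nStart - 1) 0 0

def f_with_recursion_mult_1 (n : Int) : List Int :=
  let lst : List Int := [0, 1]
  let lenLst : Int := 2
  let lst := (PySem.List.pyRange lenLst (lenLst + n - 1) 1).foldl
      (fun l i => l ++ [pvF1 l i]) lst
  PySem.List.slice lst (some 1) none

-- ===== PORT B =====
-- the body of B's inner while-loop, tail-recursive on fuel (a totalization guard only:
-- j drops by at least 1 each pass, so the Python loop never outruns it)
def pvWalk (seq : List Int) : Nat → Int → Int → Int → Int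
  | 0, _, _, total => total
  | fuel+1, j, acc, total =>
      if j ≥ 1 then
        let v := (PySem.List.pyGet? seq j).getD 0
        pvWalk seq fuel (j - (acc + v + 1)) (acc + v + 1) (total + v)
      else total

-- B's step function: walk from len(seq)-1, append the total reduced mod 10
def pvStep (seq : List Int) : List Int :=
  seq ++ [PySem.Int.mod
    (pvWalk seq ((seq.length : Int) - 1).toNat ((seq.length : Int) - 1) 0 0) 10]

-- B's outer 'while len(seq) <= n' loop, fuel-guarded ((n-1).toNat appends suffice)
def pvGrow (n : Int) : Nat → List Int → List Int
  | 0, seq => seq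
  | fuel+1, seq => if (seq.length : Int) ≤ n then pvGrow n fuel (pvStep seq) else seq

def f_with_recursion_mult_1_alt (n : Int) : List Int :=
  PySem.List.slice (pvGrow n (n - 1).toNat [0, 1]) (some 1) none

-- ===== PRECONDITION & SPEC =====
def Spec_f_with_recursion_mult_1 (n : Int) (out : List Int) : Prop := out = f_with_recursion_mult_1_alt n
instance (n : Int) (out : List Int) : Decidable (Spec_f_with_recursion_mult_1 n out) := by unfold Spec_f_with_recursion_mult_1; infer_instance

-- ===== CLAIM (what is proved, stated in full; the proofs are below) =====
def Claim_equal_f_with_recursion_mult_1 : Prop := ∀ (n : Int), Dom_f_with_recursion_mult_1 n → Spec_f_with_recursion_mult_1 n (f_with_recursion_mult_1 n)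

-- ===== LEMMAS AND PROOFS =====

-- B's tail accumulator 'total' factors out additively.
lemma pvWalk_total (seq : List Int) : ∀ (fuel : Nat) (j acc t : Int),
    pvWalk seq fuel j acc t = t + pvWalk seq fuel j acc 0 := by
  intro fuel
  induction fuel with
  | zero => intro j acc t; simp [pvWalk]
  | succ fuel ih =>
      intro j acc t
      by_cases hj : j ≥ 1
      · simp only [pvWalk, hj, if_pos]
        rw [ih _ _ (t + _), ih _ _ (0 + _)]
        ring
      · simp [pvWalk, hj]

-- Core invariant: A's running (s+v)%10 accumulator equals B's "sum the visited values,
-- one mod at the end", provided s is already reduced mod 10.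
lemma pvF2_eq_walk (lst : List Int) : ∀ (fuel : Nat) (n s acc : Int),
    s % 10 = s →
    pvF2 lst fuel n s acc = PySem.Int.mod (s + pvWalk lst fuel n acc 0) 10 := by
  intro fuel
  induction fuel with
  | zero =>
      intro n s acc hs
      simp [pvF2, pvWalk, hs]
  | succ fuel ih =>
      intro n s acc hs
      by_cases hn : n ≥ 1
      · simp only [pvF2, pvWalk, hn, if_pos]
        set v : Int := (PySem.List.pyGet? lst n).getD 0 with hv
        rw [ih (n - acc - v - 1) (PySem.Int.mod (s + v) 10) (acc + v + 1)
            (by rw [PySem.Int.mod_eq_emod_of_pos (by norm_num : (0:Int) < 10)]; omega)]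
        rw [pvWalk_total lst fuel _ _ (0 + v)]
        rw [PySem.Int.mod_eq_emod_of_pos (by norm_num : (0:Int) < 10),
            PySem.Int.mod_eq_emod_of_pos (by norm_num : (0:Int) < 10),
            PySem.Int.mod_eq_emod_of_pos (by norm_num : (0:Int) < 10)]
        have : n - acc - v - 1 = n - (acc + v + 1) := by ring
        rw [this]
        omega
      · simp [pvF2, pvWalk, hn, hs]

-- A's appended element at index i = current length equals B's step element.
lemma pvF1_eq_step (l : List Int) :
    pvF1 l (l.length : Int) = PySem.Int.mod
      (pvWalk l ((l.length : Int) - 1).toNat ((l.length : Int) - 1) 0 0) 10 := by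
  rw [pvF1, pvF2_eq_walk l _ _ _ _ (by norm_num), zero_add]

-- A's index for-loop from the current length equals B's while-on-length loop,
-- given enough fuel.
lemma foldl_eq_grow (n : Int) : ∀ (fuel : Nat) (l : List Int),
    n + 1 - (l.length : Int) ≤ fuel →
    (PySem.List.pyRange (l.length : Int) (n + 1) 1).foldl
      (fun a i => a ++ [pvF1 a i]) l = pvGrow n fuel l := by
  intro fuel
  induction fuel with
  | zero =>
      intro l h
      rw [PySem.List.pyRange_one_eq_nil (by push_cast at h ⊢; omega)]
      simp [pvGrow]
  | succ fuel ih =>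
      intro l h
      by_cases hl : (l.length : Int) ≤ n
      · rw [PySem.List.pyRange_one_cons (by omega)]
        simp only [List.foldl_cons]
        rw [pvF1_eq_step l]
        have hlen : ((pvStep l).length : Int) = (l.length : Int) + 1 := by
          simp [pvStep]
        have := ih (pvStep l) (by rw [hlen]; omega)
        rw [hlen] at this
        simp only [pvGrow, hl, if_pos, pvStep] at this ⊢
        exact this
      · rw [PySem.List.pyRange_one_eq_nil (by omega)]
        simp [pvGrow, hl]

-- ===== VERDICT (by name: the statement is the Claim_ definition above) =====
theorem f_with_recursion_mult_1_spec : Claim_equal_f_with_recursion_mult_1 := by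
  intro n _
  unfold Spec_f_with_recursion_mult_1 f_with_recursion_mult_1 f_with_recursion_mult_1_alt
  show PySem.List.slice ((PySem.List.pyRange 2 (2 + n - 1) 1).foldl
      (fun l i => l ++ [pvF1 l i]) [0, 1]) (some 1) none = _
  have h2 : (([0, 1] : List Int).length : Int) = 2 := by norm_num
  rw [show (2 : Int) + n - 1 = n + 1 from by ring,
      show ((2:Int)) = (([0,1] : List Int).length : Int) from h2.symm,
      foldl_eq_grow n (n - 1).toNat [0, 1] (by rw [h2]; omega)]
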